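-- pv_equiv track=rewrite | github.com/ankurbachchan010/randomProblems | scrubbing.py | scrapping
-- ===== SOURCE A (Python) =====
-- def scrapping(input):
--     new_text = ""
--     flag = 0
--     for i in range(len(input)):
--
--         if flag == 0:
--             if input[i] == "<" and i != len(input) - 1 and input[i + 1] == "s":
--                 flag = 2
--             else:
--                 new_text += input[i]
--
--         if flag == 2 or flag == 1:
--             if input[i] == '>':
--                 flag -= 1
--
--     return new_text
-- ===== SOURCE B (Python) =====
-- def scrapping(input):
--     out = []
--     cur = 0
--     while True:
--         p = input.find('<s', cur)
--         if p == -1: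
--             out.append(input[cur:])
--             break
--         out.append(input[cur:p])
--         g1 = input.find('>', p + 2)
--         if g1 == -1:
--             break
--         g2 = input.find('>', g1 + 1)
--         if g2 == -1:
--             break
--         cur = g2 + 1
--     return ''.join(out)
-- ===== Notes on version B (the rewrite author's own statement) =====
-- stated objective: faster
-- what changed: Replaces the per-character flag state machine with a cursor loop that locates each tag opener via str.find, skips to the second following closing bracket with two more finds, and accumulates the kept text by slicing.
import Mathlib
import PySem

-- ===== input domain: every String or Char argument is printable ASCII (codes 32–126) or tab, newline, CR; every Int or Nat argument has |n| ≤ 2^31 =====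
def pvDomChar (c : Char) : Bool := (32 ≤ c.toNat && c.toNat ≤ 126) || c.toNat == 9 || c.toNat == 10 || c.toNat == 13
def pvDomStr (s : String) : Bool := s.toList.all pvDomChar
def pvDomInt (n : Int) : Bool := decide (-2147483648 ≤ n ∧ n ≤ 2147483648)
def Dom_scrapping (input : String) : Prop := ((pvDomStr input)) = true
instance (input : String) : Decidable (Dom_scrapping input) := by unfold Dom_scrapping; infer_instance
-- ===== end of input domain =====

-- B replaces the per-character flag state machine by a find/slice cursor loop (measured faster in a timing run; same O(n) asymptotics).


-- ===== PORT A =====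
-- literal port of A: for i in range(len(input)) with state (new_text, flag)
def scrapping (input : String) : String :=
  let cs := input.toList
  let r := (PySem.List.pyRange 0 (cs.length : Int) 1).foldl
    (fun (st : List Char × Int) i =>
      let st1 :=
        if st.2 = 0 then
          if PySem.List.pyGetD cs i ' ' = '<' ∧ i ≠ (cs.length : Int) - 1 ∧
             PySem.List.pyGetD cs (i + 1) ' ' = 's'
          then (st.1, (2 : Int))
          else (st.1 ++ [PySem.List.pyGetD cs i ' '], st.2)
        else st
      if (st1.2 = 2 ∨ st1.2 = 1) ∧ PySem.List.pyGetD cs i ' ' = '>' then (st1.1, st1.2 - 1)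
      else st1)
    (([] : List Char), (0 : Int))
  String.ofList r.1

-- ===== PORT B =====
-- the while-loop of Source B; fuel only makes it total (cursor strictly grows, fuel length+1 is never exhausted)
def scrappingAltGo (cs : List Char) : Nat → Nat → List Char → List Char
  | 0, _, out => out
  | fuel + 1, cur, out =>
    let p := PySem.Chars.findFrom cs ['<', 's'] (cur : Int) none
    if p = -1 then out ++ PySem.List.slice cs (some (cur : Int)) none
    else
      let out1 := out ++ PySem.List.slice cs (some (cur : Int)) (some p)
      let g1 := PySem.Chars.findFrom cs ['>'] (p + 2) none
      if g1 = -1 then out1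
      else
        let g2 := PySem.Chars.findFrom cs ['>'] (g1 + 1) none
        if g2 = -1 then out1
        else scrappingAltGo cs fuel (g2 + 1).toNat out1

def scrapping_alt (input : String) : String :=
  String.ofList (scrappingAltGo input.toList (input.toList.length + 1) 0 [])

-- ===== PRECONDITION & SPEC =====
def Spec_scrapping (input : String) (out : String) : Prop := out = scrapping_alt input
instance (input : String) (out : String) : Decidable (Spec_scrapping input out) := by unfold Spec_scrapping; infer_instance

-- ===== CLAIM (what is proved, stated in full; the proofs are below) =====
def Claim_equal_scrapping : Prop := ∀ (input : String), Dom_scrapping input → Spec_scrapping input (scrapping input)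

-- ===== LEMMAS AND PROOFS =====

def mach : Int → List Char → List Char
  | _, [] => []
  | flag, c :: rest =>
    if flag = 0 then
      if c = '<' ∧ rest.head? = some 's' then mach 2 rest else c :: mach 0 rest
    else if c = '>' then mach (flag - 1) rest else mach flag rest

def stepA (cs : List Char) (st : List Char × Int) (j : Int) : List Char × Int :=
  let st1 :=
    if st.2 = 0 then
      if PySem.List.pyGetD cs j ' ' = '<' ∧ j ≠ (cs.length : Int) - 1 ∧
         PySem.List.pyGetD cs (j + 1) ' ' = 's'
      then (st.1, (2 : Int))
      else (st.1 ++ [PySem.List.pyGetD cs j ' '], st.2)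
    else st
  if (st1.2 = 2 ∨ st1.2 = 1) ∧ PySem.List.pyGetD cs j ' ' = '>' then (st1.1, st1.2 - 1) else st1

theorem pygetD_nat (cs : List Char) (j : Nat) (hj : j < cs.length) :
    PySem.List.pyGetD cs (j : Int) ' ' = cs[j] := by
  simp [PySem.List.pyGetD_natCast, List.getD_eq_getElem?_getD, List.getElem?_eq_getElem hj]

theorem singleton_prefix_iff (a : Char) (m : List Char) : [a] <+: m ↔ m.head? = some a := by
  constructor
  · rintro ⟨u, hu⟩; rw [← hu]; rfl
  · intro h
    cases m with
    | nil => simp at h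
    | cons b t => simp at h; exact ⟨t, by rw [h]; rfl⟩

theorem pair_prefix_iff (a b : Char) (m : List Char) :
    [a, b] <+: m ↔ ∃ t, m = a :: b :: t := by
  constructor
  · rintro ⟨u, hu⟩; exact ⟨u, hu.symm⟩
  · rintro ⟨t, ht⟩; exact ⟨t, ht.symm⟩

theorem foldA (cs : List Char) :
    ∀ k i (acc : List Char) (flag : Int), cs.length - i ≤ k →
      flag = 0 ∨ flag = 1 ∨ flag = 2 →
      ((PySem.List.pyRange (i : Int) (cs.length : Int) 1).foldl (stepA cs) (acc, flag)).1
        = acc ++ mach flag (cs.drop i) := by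
  intro k
  induction k with
  | zero =>
    intro i acc flag hk _
    have hni : cs.length ≤ i := by omega
    rw [PySem.List.pyRange_one_eq_nil (by exact_mod_cast hni), List.drop_eq_nil_of_le hni]
    simp [mach]
  | succ k ih =>
    intro i acc flag hk hf
    by_cases hi : cs.length ≤ i
    · rw [PySem.List.pyRange_one_eq_nil (by exact_mod_cast hi), List.drop_eq_nil_of_le hi]
      simp [mach]
    · replace hi : i < cs.length := by omega
      have hcons : PySem.List.pyRange (i : Int) (cs.length : Int) 1 =
          (i : Int) :: PySem.List.pyRange ((i : Int) + 1) (cs.length : Int) 1 :=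
        PySem.List.pyRange_one_cons (by exact_mod_cast hi)
      have hcast : ((i : Int) + 1) = ((i + 1 : Nat) : Int) := by push_cast; ring
      have hget : PySem.List.pyGetD cs (i : Int) ' ' = cs[i] := pygetD_nat cs i hi
      have hdrop : cs.drop i = cs[i] :: cs.drop (i + 1) := List.drop_eq_getElem_cons hi
      have hcond : ((i : Int) ≠ (cs.length : Int) - 1 ∧ PySem.List.pyGetD cs ((i : Int) + 1) ' ' = 's')
          ↔ (cs.drop (i + 1)).head? = some 's' := by
        rw [List.head?_drop]
        by_cases h1 : i + 1 < cs.length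
        · rw [hcast, pygetD_nat cs (i + 1) h1, List.getElem?_eq_getElem h1]
          constructor
          · rintro ⟨-, h⟩; simpa using h
          · intro h; exact ⟨by omega, by simpa using h⟩
        · rw [List.getElem?_eq_none (by omega)]
          constructor
          · rintro ⟨h, -⟩; exact absurd (by omega : (i : Int) = (cs.length : Int) - 1) h
          · intro h; simp at h
      rw [hcons, List.foldl_cons]
      rcases hf with hf | hf | hf
      · subst hf
        by_cases hc : PySem.List.pyGetD cs (i : Int) ' ' = '<' ∧ (i : Int) ≠ (cs.length : Int) - 1 ∧
            PySem.List.pyGetD cs ((i : Int) + 1) ' ' = 's'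
        · have hstep : stepA cs (acc, 0) (i : Int) = (acc, 2) := by
            simp [stepA, hc.1, hc.2.1, hc.2.2]
          rw [hstep, hcast, ih (i + 1) acc 2 (by omega) (by tauto), hdrop]
          have hm : mach 0 (cs[i] :: cs.drop (i + 1)) = mach 2 (cs.drop (i + 1)) := by
            rw [mach, if_pos rfl, if_pos ⟨by rw [← hget]; exact hc.1, hcond.mp ⟨hc.2.1, hc.2.2⟩⟩]
          rw [hm]
        · rw [hget] at hc
          have hstep : stepA cs (acc, 0) (i : Int) = (acc ++ [cs[i]], 0) := by
            simp only [stepA, hget]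
            rw [if_neg hc]
            norm_num
          rw [hstep, hcast, ih (i + 1) (acc ++ [cs[i]]) 0 (by omega) (by tauto), hdrop]
          have hm : mach 0 (cs[i] :: cs.drop (i + 1)) = cs[i] :: mach 0 (cs.drop (i + 1)) := by
            rw [mach, if_pos rfl, if_neg]
            rintro ⟨h1, h2⟩
            exact hc ⟨h1, (hcond.mpr h2).1, (hcond.mpr h2).2⟩
          rw [hm, List.append_assoc]
          rfl
      · subst hf
        by_cases hgt : cs[i] = '>'
        · have hstep : stepA cs (acc, 1) (i : Int) = (acc, 0) := by
            simp [stepA, hget, hgt]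
          rw [hstep, hcast, ih (i + 1) acc 0 (by omega) (by tauto), hdrop]
          rw [mach, if_neg (by decide), if_pos hgt]
          norm_num
        · have hstep : stepA cs (acc, 1) (i : Int) = (acc, 1) := by
            simp [stepA, hget, hgt]
          rw [hstep, hcast, ih (i + 1) acc 1 (by omega) (by tauto), hdrop]
          rw [mach, if_neg (by decide), if_neg hgt]
      · subst hf
        by_cases hgt : cs[i] = '>'
        · have hstep : stepA cs (acc, 2) (i : Int) = (acc, 1) := by
            simp [stepA, hget, hgt]
          rw [hstep, hcast, ih (i + 1) acc 1 (by omega) (by tauto), hdrop]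
          rw [mach, if_neg (by decide), if_pos hgt]
          norm_num
        · have hstep : stepA cs (acc, 2) (i : Int) = (acc, 2) := by
            simp [stepA, hget, hgt]
          rw [hstep, hcast, ih (i + 1) acc 2 (by omega) (by tauto), hdrop]
          rw [mach, if_neg (by decide), if_neg hgt]

-- no "<s" in l: the machine copies l verbatim
theorem mach0_no_occ : ∀ l : List Char, ¬ ['<', 's'] <:+: l → mach 0 l = l := by
  intro l
  induction l with
  | nil => intro _; simp [mach]
  | cons c rest ih =>
    intro h
    rw [mach, if_pos rfl, if_neg, ih (fun hi => h (List.infix_cons hi))]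
    rintro ⟨hc, hs⟩
    subst hc
    obtain ⟨u, hu⟩ := (singleton_prefix_iff 's' rest).mpr hs
    exact h ⟨[], u, by rw [← hu]; rfl⟩

-- copy up to the first possible occurrence
theorem mach0_take : ∀ j (l : List Char), (∀ i, i < j → ¬ ['<', 's'] <+: l.drop i) →
    mach 0 l = l.take j ++ mach 0 (l.drop j) := by
  intro j
  induction j with
  | zero => intro l _; simp
  | succ j ih =>
    intro l h
    cases l with
    | nil => simp [mach]
    | cons c rest =>
      have h0 : ¬ ['<', 's'] <+: c :: rest := h 0 (by omega)
      rw [mach, if_pos rfl, if_neg]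
      · rw [ih rest (fun i hi => h (i + 1) (by omega))]
        simp
      · rintro ⟨hc, hs⟩
        subst hc
        obtain ⟨u, hu⟩ := (singleton_prefix_iff 's' rest).mpr hs
        exact h0 ⟨u, by rw [← hu]; rfl⟩

-- no '>' in l: machine in state 1 or 2 emits nothing
theorem mach_no_gt : ∀ (l : List Char) (f : Int), f = 1 ∨ f = 2 → '>' ∉ l → mach f l = [] := by
  intro l
  induction l with
  | nil => intro f _ _; simp [mach]
  | cons c rest ih =>
    intro f hf hmem
    rw [mach, if_neg (by rcases hf with h | h <;> subst h <;> decide),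
      if_neg (by intro h; exact hmem (by simp [h]))]
    exact ih f hf (fun h => hmem (List.mem_cons_of_mem _ h))

-- first '>' at index t: machine in state f drops through it to state f-1
theorem mach_skip : ∀ t (l : List Char) (f : Int), f = 1 ∨ f = 2 →
    l[t]? = some '>' → (∀ i, i < t → l[i]? ≠ some '>') →
    mach f l = mach (f - 1) (l.drop (t + 1)) := by
  intro t
  induction t with
  | zero =>
    intro l f hf hget _
    cases l with
    | nil => simp at hget
    | cons c rest =>
      simp at hget
      subst hget
      rw [mach, if_neg (by rcases hf with h | h <;> subst h <;> decide), if_pos rfl]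
      simp
  | succ t ih =>
    intro l f hf hget hmin
    cases l with
    | nil => simp at hget
    | cons c rest =>
      have hc : c ≠ '>' := by
        intro h; exact hmin 0 (by omega) (by simp [h])
      rw [mach, if_neg (by rcases hf with h | h <;> subst h <;> decide), if_neg hc]
      rw [ih rest f hf (by simpa using hget) (fun i hi => by
        have := hmin (i + 1) (by omega); simpa using this)]
      simp

-- B's loop from cursor cur computes mach 0 on the suffix
theorem altGo_eq (cs : List Char) : ∀ fuel cur (out : List Char), cur ≤ cs.length →
    cs.length - cur < fuel →
    scrappingAltGo cs fuel cur out = out ++ mach 0 (cs.drop cur) := by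
  intro fuel
  induction fuel with
  | zero => intro cur out hc hf; omega
  | succ fuel ih =>
    intro cur out hcur hfuel
    rw [scrappingAltGo]
    by_cases hp : PySem.Chars.findFrom cs ['<', 's'] (cur : Int) none = -1
    · rw [if_pos hp, PySem.List.slice_from_natCast]
      rw [mach0_no_occ _ ((PySem.Chars.findFrom_natCast_eq_neg_one_iff cs ['<', 's'] cur hcur).mp hp)]
    · rw [if_neg hp]
      obtain ⟨hle, hpre, hmin⟩ := PySem.Chars.findFrom_natCast_spec cs ['<', 's'] cur hcur hp
      set p := PySem.Chars.findFrom cs ['<', 's'] (cur : Int) none with hpdef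
      obtain ⟨rest, hrest⟩ := (pair_prefix_iff _ _ _).mp hpre
      have hp0 : 0 ≤ p := le_trans (by exact_mod_cast Nat.zero_le cur) hle
      have hplen : p.toNat + 2 ≤ cs.length := by
        have : (cs.drop p.toNat).length = cs.length - p.toNat := List.length_drop
        rw [hrest] at this
        simp at this
        omega
      -- the kept slice
      have hslice : PySem.List.slice cs (some (cur : Int)) (some p) = (cs.drop cur).take (p.toNat - cur) := by
        have hcast : p = ((p.toNat : Nat) : Int) := by omega
        have h := PySem.List.slice_natCast (xs := cs) (a := cur) (b := p.toNat)
        rw [← hcast] at h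
        exact h
      -- mach 0 on the suffix: copy to p, then enter the tag
      have hmach : mach 0 (cs.drop cur) =
          (cs.drop cur).take (p.toNat - cur) ++ mach 2 (cs.drop (p.toNat + 1)) := by
        rw [mach0_take (p.toNat - cur) (cs.drop cur) (fun i hi => by
          rw [List.drop_drop]
          have := hmin (cur + i) (by omega) (by omega)
          simpa [Nat.add_comm] using this)]
        congr 1
        rw [List.drop_drop]
        have hcp : cur + (p.toNat - cur) = p.toNat := by omega
        rw [hcp, hrest]
        rw [mach, if_pos rfl, if_pos ⟨rfl, by simp⟩]
        have : ('s' : Char) :: rest = cs.drop (p.toNat + 1) := by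
          have := List.drop_eq_getElem_cons (l := cs) (i := p.toNat) (by omega)
          rw [hrest] at this
          have hhd : cs[p.toNat] = '<' ∧ cs.drop (p.toNat + 1) = 's' :: rest := by
            constructor
            · exact (List.cons_eq_cons.mp this).1.symm
            · exact (List.cons_eq_cons.mp this).2.symm
          exact hhd.2.symm
        rw [this]
      have hmach2 : mach 2 (cs.drop (p.toNat + 1)) = mach 2 (cs.drop (p.toNat + 2)) := by
        have : cs.drop (p.toNat + 1) = 's' :: cs.drop (p.toNat + 2) := by
          have h1 := List.drop_eq_getElem_cons (l := cs) (i := p.toNat) (by omega)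
          rw [hrest] at h1
          have h2 : cs.drop (p.toNat + 1) = 's' :: rest := (List.cons_eq_cons.mp h1).2.symm
          have h3 := List.drop_eq_getElem_cons (l := cs) (i := p.toNat + 1) (by omega)
          rw [h2] at h3
          rw [h2, (List.cons_eq_cons.mp h3).2]
        rw [this]
        simp [mach]
      have hp2cast : p + 2 = ((p.toNat + 2 : Nat) : Int) := by push_cast; omega
      by_cases hg1 : PySem.Chars.findFrom cs ['>'] (p + 2) none = -1
      · rw [if_pos hg1, hslice, hmach, hmach2]
        rw [hp2cast] at hg1
        have hno := (PySem.Chars.findFrom_natCast_eq_neg_one_iff cs ['>'] (p.toNat + 2) hplen).mp hg1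
        rw [mach_no_gt _ 2 (by norm_num) (fun hmem => by
          obtain ⟨s, t, hst⟩ := List.append_of_mem hmem
          exact hno ⟨s, t, by simp [hst]⟩)]
        simp
      · rw [if_neg hg1]
        rw [hp2cast] at hg1 ⊢
        obtain ⟨hle1, hpre1, hmin1⟩ := PySem.Chars.findFrom_natCast_spec cs ['>'] (p.toNat + 2) hplen hg1
        set g1 := PySem.Chars.findFrom cs ['>'] ((p.toNat + 2 : Nat) : Int) none with hg1def
        have hg1lt : g1.toNat < cs.length := by
          rcases hpre1 with ⟨t, ht⟩
          have : (cs.drop g1.toNat).length = cs.length - g1.toNat := List.length_drop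
          rw [← ht] at this
          simp at this
          omega
        have hmachA : mach 2 (cs.drop (p.toNat + 2)) = mach 1 (cs.drop (g1.toNat + 1)) := by
          have := mach_skip (g1.toNat - (p.toNat + 2)) (cs.drop (p.toNat + 2)) 2 (by norm_num)
            (by
              rw [List.getElem?_drop]
              have : p.toNat + 2 + (g1.toNat - (p.toNat + 2)) = g1.toNat := by omega
              rw [this]
              have := (singleton_prefix_iff '>' (cs.drop g1.toNat)).mp hpre1
              rwa [List.head?_drop] at this)
            (fun i hi => by
              rw [List.getElem?_drop]
              intro hbad
              have hnp := hmin1 (p.toNat + 2 + i) (by omega) (by omega)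
              rw [singleton_prefix_iff, List.head?_drop] at hnp
              exact hnp hbad)
          rw [this, List.drop_drop]
          norm_num
          have : p.toNat + 2 + (g1.toNat - (p.toNat + 2) + 1) = g1.toNat + 1 := by omega
          rw [this]
        have hg11cast : g1 + 1 = ((g1.toNat + 1 : Nat) : Int) := by
          have : 0 ≤ g1 := le_trans (by positivity) hle1
          push_cast; omega
        by_cases hg2 : PySem.Chars.findFrom cs ['>'] (g1 + 1) none = -1
        · rw [if_pos hg2, hslice, hmach, hmach2, hmachA]
          rw [hg11cast] at hg2
          have hno := (PySem.Chars.findFrom_natCast_eq_neg_one_iff cs ['>'] (g1.toNat + 1) (by omega)).mp hg2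
          rw [mach_no_gt _ 1 (by norm_num) (fun hmem => by
            obtain ⟨s, t, hst⟩ := List.append_of_mem hmem
            exact hno ⟨s, t, by simp [hst]⟩)]
          simp
        · rw [if_neg hg2]
          rw [hg11cast] at hg2 ⊢
          obtain ⟨hle2, hpre2, hmin2⟩ := PySem.Chars.findFrom_natCast_spec cs ['>'] (g1.toNat + 1) (by omega) hg2
          set g2 := PySem.Chars.findFrom cs ['>'] ((g1.toNat + 1 : Nat) : Int) none with hg2def
          have hg2lt : g2.toNat < cs.length := by
            rcases hpre2 with ⟨t, ht⟩
            have : (cs.drop g2.toNat).length = cs.length - g2.toNat := List.length_drop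
            rw [← ht] at this
            simp at this
            omega
          have hmachB : mach 1 (cs.drop (g1.toNat + 1)) = mach 0 (cs.drop (g2.toNat + 1)) := by
            have := mach_skip (g2.toNat - (g1.toNat + 1)) (cs.drop (g1.toNat + 1)) 1 (by norm_num)
              (by
                rw [List.getElem?_drop]
                have : g1.toNat + 1 + (g2.toNat - (g1.toNat + 1)) = g2.toNat := by omega
                rw [this]
                have := (singleton_prefix_iff '>' (cs.drop g2.toNat)).mp hpre2
                rwa [List.head?_drop] at this)
              (fun i hi => by
                rw [List.getElem?_drop]
                intro hbad
                have hnp := hmin2 (g1.toNat + 1 + i) (by omega) (by omega)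
                rw [singleton_prefix_iff, List.head?_drop] at hnp
                exact hnp hbad)
            rw [this, List.drop_drop]
            norm_num
            have : g1.toNat + 1 + (g2.toNat - (g1.toNat + 1) + 1) = g2.toNat + 1 := by omega
            rw [this]
          have hcasttoNat : (g2 + 1).toNat = g2.toNat + 1 := by
            have : 0 ≤ g2 := le_trans (by positivity) hle2
            omega
          rw [hcasttoNat, ih (g2.toNat + 1) (out ++ PySem.List.slice cs (some (cur : Int)) (some p))
            (by omega) (by omega)]
          rw [hslice, hmach, hmach2, hmachA, hmachB]
          simp

-- ===== VERDICT (by name: the statement is the Claim_ definition above) =====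
theorem scrapping_spec : Claim_equal_scrapping := by
  intro input _
  unfold Spec_scrapping scrapping scrapping_alt
  have hA := foldA input.toList input.toList.length 0 [] 0 (by omega) (by tauto)
  have hB := altGo_eq input.toList (input.toList.length + 1) 0 [] (by omega) (by omega)
  simp only [Nat.cast_zero] at hA
  rw [hB]
  show String.ofList ((PySem.List.pyRange 0 (input.toList.length : Int) 1).foldl
    (stepA input.toList) ([], 0)).1 = _
  rw [hA]
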